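-- pv_equiv track=rewrite | github.com/venuverrivandla/Bank-Management-System | Bank_Management_System.py | serialize_kv
-- ===== SOURCE A (Python) =====
-- def serialize_kv(d):
--     """Convert dict -> key: value lines (stable order)"""
--     order = [
--         "account_holder_name",
--         "mobile_number",
--         "aadhar_number",
--         "account_number",
--         "current_balance",
--         "debit_card_number",  # optional
--     ]
--     lines = []
--     for k in order:
--         if k in d:
--             lines.append(f"{k}: {d[k]}\n")
--     # include any extra keys deterministically
--     for k in sorted(set(d.keys()) - set(order)):
--         lines.append(f"{k}: {d[k]}\n")
--     return lines
-- ===== SOURCE B (Python) =====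
-- def serialize_kv(d):
--     """Convert dict -> key: value lines (stable order)"""
--     order = [
--         "account_holder_name",
--         "mobile_number",
--         "aadhar_number",
--         "account_number",
--         "current_balance",
--         "debit_card_number",  # optional
--     ]
--     rank = {name: i for i, name in enumerate(order)}
--     n = len(order)
--     return [f"{k}: {d[k]}\n" for k in sorted(d, key=lambda k: (rank.get(k, n), k))]
-- ===== Notes on version B (the rewrite author's own statement) =====
-- stated objective: simpler
-- what changed: Replaces A's two sequential loops (fixed-order scan plus a separate sorted-extras scan) by building a rank table once and emitting all lines in a single table-driven sorted traversal of the keys.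
import Mathlib
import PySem

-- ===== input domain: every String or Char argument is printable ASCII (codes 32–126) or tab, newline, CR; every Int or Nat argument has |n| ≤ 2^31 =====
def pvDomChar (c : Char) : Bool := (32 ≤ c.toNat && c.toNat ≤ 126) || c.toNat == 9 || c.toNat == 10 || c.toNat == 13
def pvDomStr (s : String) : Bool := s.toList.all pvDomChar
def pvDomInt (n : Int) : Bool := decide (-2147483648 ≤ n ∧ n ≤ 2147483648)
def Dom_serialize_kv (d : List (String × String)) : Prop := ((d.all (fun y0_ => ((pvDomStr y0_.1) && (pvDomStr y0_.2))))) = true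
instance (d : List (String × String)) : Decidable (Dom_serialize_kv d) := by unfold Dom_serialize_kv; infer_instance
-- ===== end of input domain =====

-- B replaces A's two sequential output loops by one table-driven sorted traversal of the keys (simpler decomposition, same cost).


-- the fixed key order (the literal list both Pythons write out)
def pvOrder : List String :=
  ["account_holder_name", "mobile_number", "aadhar_number", "account_number", "current_balance", "debit_card_number"]

-- f"{k}: {v}\n"
def pvLine (k v : String) : String := k ++ ": " ++ v ++ "\n"

-- ===== PORT A =====
def serialize_kv (d : List (String × String)) : List String :=
  let dd := PySem.Dict.ofList d
  let lines : List String :=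
    pvOrder.foldl
      (fun acc k => if PySem.Dict.contains dd k then acc ++ [pvLine k (PySem.Dict.getD dd k "")] else acc) []
  (PySem.List.sorted
      (PySem.Set.diff (PySem.Set.ofList (PySem.Dict.keys dd)) (PySem.Set.ofList pvOrder)) (fun x => x) false).foldl
    (fun acc k => acc ++ [pvLine k (PySem.Dict.getD dd k "")]) lines

-- ===== PORT B =====
-- rank = {name: i for i, name in enumerate(order)}
def pvRank : PySem.Dict String Int :=
  (PySem.List.enumerate pvOrder 0).foldl (fun r p => PySem.Dict.insert r p.2 p.1) PySem.Dict.empty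

def serialize_kv_alt (d : List (String × String)) : List String :=
  let dd := PySem.Dict.ofList d
  let n : Int := (pvOrder.length : Int)
  (PySem.List.sorted2 (PySem.Dict.keys dd)
      (fun k => PySem.Dict.getD pvRank k n) (fun k => k) false).map
    (fun k => pvLine k (PySem.Dict.getD dd k ""))

-- ===== PRECONDITION & SPEC =====
def Spec_serialize_kv (d : List (String × String)) (out : List String) : Prop := out = serialize_kv_alt d
instance (d : List (String × String)) (out : List String) : Decidable (Spec_serialize_kv d out) := by unfold Spec_serialize_kv; infer_instance

-- ===== CLAIM (what is proved, stated in full; the proofs are below) =====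
def Claim_equal_serialize_kv : Prop := ∀ (d : List (String × String)), Dom_serialize_kv d → Spec_serialize_kv d (serialize_kv d)

-- ===== LEMMAS AND PROOFS =====

-- B's tuple-key sort is the sort by the corresponding lexicographic key
theorem pv_sorted2_eq (xs : List String) (k1 : String → Int) :
    PySem.List.sorted2 xs k1 (fun k => k) false
      = PySem.List.sorted xs (fun k => toLex (k1 k, k)) false := by
  have hcmp : ∀ a b : String,
      (decide (k1 a < k1 b) || (!decide (k1 b < k1 a) && decide (a < b)))
        = decide (toLex (k1 a, a) < toLex (k1 b, b)) := by
    intro a b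
    rcases lt_trichotomy (k1 a) (k1 b) with h | h | h
    · simp [Prod.Lex.toLex_lt_toLex, h]
    · simp [Prod.Lex.toLex_lt_toLex, h]
    · simp [Prod.Lex.toLex_lt_toLex, h, lt_asymm h, ne_of_gt h]
  exact congrArg (fun f => List.foldl (fun acc x => PySem.List.insertBy f x acc) [] xs)
    (funext fun a => funext fun b => hcmp a b)

theorem pvOrder_nodup : pvOrder.Nodup := by decide

theorem pvRank_pairwise :
    pvOrder.Pairwise (fun a b => PySem.Dict.getD pvRank a (pvOrder.length : Int) < PySem.Dict.getD pvRank b (pvOrder.length : Int)) := by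
  decide

theorem pvRank_lt_of_mem :
    ∀ k ∈ pvOrder, PySem.Dict.getD pvRank k (pvOrder.length : Int) < (pvOrder.length : Int) := by
  decide

theorem pvRank_of_not_mem (k : String) (h : k ∉ pvOrder) :
    PySem.Dict.getD pvRank k (pvOrder.length : Int) = (pvOrder.length : Int) := by
  simp only [pvOrder, List.mem_cons, List.not_mem_nil, or_false, not_or] at h
  obtain ⟨h1, h2, h3, h4, h5, h6⟩ := h
  have e : pvRank = PySem.Dict.mk
      [("account_holder_name", (0 : Int)), ("mobile_number", 1), ("aadhar_number", 2),
       ("account_number", 3), ("current_balance", 4), ("debit_card_number", 5)] := by decide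
  have hc : PySem.Dict.contains (PySem.Dict.mk
      [("account_holder_name", (0 : Int)), ("mobile_number", 1), ("aadhar_number", 2),
       ("account_number", 3), ("current_balance", 4), ("debit_card_number", 5)]) k = false := by
    simp [Ne.symm h1, Ne.symm h2, Ne.symm h3, Ne.symm h4, Ne.symm h5, Ne.symm h6]
  rw [e, PySem.Dict.getD_of_not_contains _ _ hc]

-- the single lexicographic sort of the keys is: the present fixed-order keys, then the extras in string order
theorem pv_sorted_keys_eq (d : List (String × String)) :
    PySem.List.sorted (PySem.Dict.keys (PySem.Dict.ofList d))
        (fun k => toLex (PySem.Dict.getD pvRank k (pvOrder.length : Int), k)) false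
      = pvOrder.filter (fun k => PySem.Dict.contains (PySem.Dict.ofList d) k)
        ++ PySem.List.sorted
            (PySem.Set.diff (PySem.Set.ofList (PySem.Dict.keys (PySem.Dict.ofList d))) (PySem.Set.ofList pvOrder))
            (fun x => x) false := by
  have hkeys : (PySem.Dict.keys (PySem.Dict.ofList d)).Nodup := PySem.Dict.nodup_keys_ofList d
  have hEperm := PySem.List.sorted_perm
    (PySem.Set.diff (PySem.Set.ofList (PySem.Dict.keys (PySem.Dict.ofList d))) (PySem.Set.ofList pvOrder))
    (fun x => x) false
  have hEnd : (PySem.List.sorted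
      (PySem.Set.diff (PySem.Set.ofList (PySem.Dict.keys (PySem.Dict.ofList d))) (PySem.Set.ofList pvOrder))
      (fun x => x) false).Nodup :=
    hEperm.nodup_iff.mpr (PySem.Set.nodup_diff _ _ (PySem.Set.nodup_ofList _))
  have hmemE : ∀ x, x ∈ PySem.List.sorted
      (PySem.Set.diff (PySem.Set.ofList (PySem.Dict.keys (PySem.Dict.ofList d))) (PySem.Set.ofList pvOrder))
      (fun x => x) false ↔ x ∈ PySem.Dict.keys (PySem.Dict.ofList d) ∧ x ∉ pvOrder := by
    intro x
    rw [PySem.List.mem_sorted, PySem.Set.mem_diff, PySem.Set.mem_ofList, PySem.Set.mem_ofList]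
  have hmemF : ∀ x, x ∈ pvOrder.filter (fun k => PySem.Dict.contains (PySem.Dict.ofList d) k)
      ↔ x ∈ pvOrder ∧ x ∈ PySem.Dict.keys (PySem.Dict.ofList d) := by
    intro x
    rw [List.mem_filter]
    exact and_congr_right fun _ => PySem.Dict.contains_iff_mem_keys _ _
  apply PySem.List.sorted_eq_of_perm_of_pairwise_lt
  · refine (List.perm_ext_iff_of_nodup ?_ hkeys).mpr ?_
    · refine List.Nodup.append (pvOrder_nodup.filter _) hEnd ?_
      intro a haf haE
      exact ((hmemE a).mp haE).2 ((hmemF a).mp haf).1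
    · intro a
      rw [List.mem_append, hmemF a, hmemE a]
      tauto
  · rw [List.pairwise_append]
    refine ⟨?_, ?_, ?_⟩
    · refine (pvRank_pairwise.filter _).imp ?_
      intro a b hab
      exact Prod.Lex.toLex_lt_toLex.mpr (Or.inl hab)
    · have hle := PySem.List.sorted_pairwise
        (PySem.Set.diff (PySem.Set.ofList (PySem.Dict.keys (PySem.Dict.ofList d))) (PySem.Set.ofList pvOrder))
        (fun x => x)
      refine (hle.and hEnd).imp_of_mem ?_
      intro a b ha hb hab
      have hra := pvRank_of_not_mem a ((hmemE a).mp ha).2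
      have hrb := pvRank_of_not_mem b ((hmemE b).mp hb).2
      exact Prod.Lex.toLex_lt_toLex.mpr (Or.inr ⟨by rw [hra, hrb], lt_of_le_of_ne hab.1 hab.2⟩)
    · intro a haf b hbE
      have hra := pvRank_lt_of_mem a ((hmemF a).mp haf).1
      have hrb := pvRank_of_not_mem b ((hmemE b).mp hbE).2
      exact Prod.Lex.toLex_lt_toLex.mpr (Or.inl (by rw [hrb]; exact hra))

theorem pv_main (d : List (String × String)) : serialize_kv d = serialize_kv_alt d := by
  simp only [serialize_kv, serialize_kv_alt]
  rw [PySem.List.foldl_append_singleton_eq_map, PySem.List.foldl_append_if, pv_sorted2_eq,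
      pv_sorted_keys_eq, List.nil_append, List.map_append]

-- ===== VERDICT (by name: the statement is the Claim_ definition above) =====
theorem serialize_kv_spec : Claim_equal_serialize_kv := by
  intro d _
  unfold Spec_serialize_kv
  exact pv_main d
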